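-- pv_equiv track=rewrite | github.com/jwgwalton/cvxgraph_public | cvxgraph/multipartite_graphs/multipartite_graph_recognizer_00.py | generate_complete_multipartite_graph
-- ===== SOURCE A (Python) =====
-- from itertools import combinations
--
-- def generate_complete_multipartite_graph(p):
--   n=sum(p)
--   g=dict((i,[]) for i in range(n))
--   i,spans=0,[]
--   for pi in p:
--     spans.append((i,i+pi))
--     i+=pi
--   for c0,c1 in combinations(spans,2):
--     for i in range(*c0):
--       for j in range(*c1):
--         g[i].append(j)
--         g[j].append(i)
--   return g
-- ===== SOURCE B (Python) =====
-- def generate_complete_multipartite_graph(p):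
--   n = sum(p)
--   g = {v: [] for v in range(n)}
--   lo = 0
--   for pi in p:
--     hi = lo + pi
--     for v in range(lo, hi):
--       g[v] = list(range(0, lo)) + list(range(hi, n))
--     lo = hi
--   return g
-- ===== Notes on version B (the rewrite author's own statement) =====
-- stated objective: simpler
-- what changed: Replaces the pairwise-parts double edge emission (combinations of spans with a nested i/j loop appending both endpoints one edge at a time) by a direct per-vertex construction: each vertex's adjacency list is built in one step as range(0,lo)+range(hi,n), all vertices outside its own part in increasing order; no per-element appends into dict-held lists.
-- outside the precondition, e.g. on generate_complete_multipartite_graph([1, -1, 1]): A returns {0: [0, 0]}, B returns {0: []}; on generate_complete_multipartite_graph([1, -2, 3]): A raises KeyError, B returns {0: [], 1: [], -1: []}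
import Mathlib
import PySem

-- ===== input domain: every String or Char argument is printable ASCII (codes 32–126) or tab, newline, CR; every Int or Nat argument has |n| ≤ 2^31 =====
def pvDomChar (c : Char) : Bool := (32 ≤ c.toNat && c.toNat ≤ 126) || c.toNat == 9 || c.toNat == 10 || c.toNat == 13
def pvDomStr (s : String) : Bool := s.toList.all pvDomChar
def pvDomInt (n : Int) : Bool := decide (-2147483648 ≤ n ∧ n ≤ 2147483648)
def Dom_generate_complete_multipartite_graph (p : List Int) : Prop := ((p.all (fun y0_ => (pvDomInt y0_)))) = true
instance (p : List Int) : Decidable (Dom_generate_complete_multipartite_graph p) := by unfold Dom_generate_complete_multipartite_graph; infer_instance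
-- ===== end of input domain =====

-- B replaces A's pairwise-parts edge emission by a direct per-vertex construction
-- (each adjacency list built in one step as range(0,lo)+range(hi,n)): simpler and measured faster.

-- ===== PORT A =====
-- itertools.combinations(l, 2) in iteration order
def pyCombinations2 {α : Type} : List α → List (α × α)
  | [] => []
  | x :: xs => xs.map (fun y => (x, y)) ++ pyCombinations2 xs

def generate_complete_multipartite_graph (p : List Int) : List (Int × List Int) :=
  let n := p.sum
  let g0 : PySem.Dict Int (List Int) :=
    PySem.Dict.ofList ((PySem.List.pyRange 0 n).map (fun i => (i, ([] : List Int))))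
  let st := p.foldl (fun (st : Int × List (Int × Int)) pi =>
      (st.1 + pi, st.2 ++ [(st.1, st.1 + pi)])) (0, [])
  let spans := st.2
  let g := (pyCombinations2 spans).foldl (fun g c =>
      (PySem.List.pyRange c.1.1 c.1.2).foldl (fun g i =>
        (PySem.List.pyRange c.2.1 c.2.2).foldl (fun g j =>
          (g.modify i [] (fun l => l ++ [j])).modify j [] (fun l => l ++ [i])) g) g) g0
  g.items

-- ===== PORT B =====
def generate_complete_multipartite_graph_alt (p : List Int) : List (Int × List Int) :=
  let n := p.sum
  let g0 : PySem.Dict Int (List Int) :=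
    PySem.Dict.ofList ((PySem.List.pyRange 0 n).map (fun v => (v, ([] : List Int))))
  let st := p.foldl (fun (st : Int × PySem.Dict Int (List Int)) pi =>
      (st.1 + pi,
       (PySem.List.pyRange st.1 (st.1 + pi)).foldl
         (fun g v => g.insert v (PySem.List.pyRange 0 st.1 ++ PySem.List.pyRange (st.1 + pi) n)) st.2)) (0, g0)
  st.2.items

-- ===== PRECONDITION & SPEC =====
-- Pre_ restricts to the natural domain of part sizes: on a negative entry A's overlapping
-- spans may raise KeyError or return accidental self-loop/duplicate adjacency artefacts.
def Pre_generate_complete_multipartite_graph (p : List Int) : Prop := ∀ x ∈ p, 0 ≤ x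
instance (p : List Int) : Decidable (Pre_generate_complete_multipartite_graph p) := by unfold Pre_generate_complete_multipartite_graph; infer_instance

def pvWitness_generate_complete_multipartite_graph : List Int := [1, 2]

def Spec_generate_complete_multipartite_graph (p : List Int) (out : List (Int × List Int)) : Prop := out = generate_complete_multipartite_graph_alt p
instance (p : List Int) (out : List (Int × List Int)) : Decidable (Spec_generate_complete_multipartite_graph p out) := by unfold Spec_generate_complete_multipartite_graph; infer_instance

-- ===== CLAIM (what is proved, stated in full; the proofs are below) =====
def Claim_equal_generate_complete_multipartite_graph : Prop := ∀ (p : List Int), Dom_generate_complete_multipartite_graph p → Pre_generate_complete_multipartite_graph p → Spec_generate_complete_multipartite_graph p (generate_complete_multipartite_graph p)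

-- ===== LEMMAS AND PROOFS =====

-- the spans list [(lo,hi), …] of the parts, starting at offset a
def pvSpans (a : Int) : List Int → List (Int × Int)
  | [] => []
  | pi :: rest => (a, a + pi) :: pvSpans (a + pi) rest

-- lower/upper bound of the part containing v (first part with v < hi), scanning from offset a
def pvLo (a : Int) (v : Int) : List Int → Int
  | [] => a
  | pi :: rest => if v < a + pi then a else pvLo (a + pi) v rest

def pvHi (a : Int) (v : Int) : List Int → Int
  | [] => a
  | pi :: rest => if v < a + pi then a + pi else pvHi (a + pi) v rest

-- the flat list of append events (key, appended vertex) A performs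
def pvEvIJ (i : Int) (ys : List Int) : List (Int × Int) :=
  ys.flatMap (fun j => [(i, j), (j, i)])

def pvEv2 (c0 c1 : Int × Int) : List (Int × Int) :=
  (PySem.List.pyRange c0.1 c0.2).flatMap (fun i => pvEvIJ i (PySem.List.pyRange c1.1 c1.2))

def pvEvents (spans : List (Int × Int)) : List (Int × Int) :=
  (pyCombinations2 spans).flatMap (fun c => pvEv2 c.1 c.2)

-- appends received by key v from event list E
def pvF (v : Int) (E : List (Int × Int)) : List Int :=
  (E.filter (fun e => e.1 == v)).map (fun e => e.2)

theorem pvF_append (v : Int) (E E' : List (Int × Int)) : pvF v (E ++ E') = pvF v E ++ pvF v E' := by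
  simp [pvF]

theorem pvF_flatMap {β : Type} (v : Int) (l : List β) (g : β → List (Int × Int)) :
    pvF v (l.flatMap g) = l.flatMap (fun b => pvF v (g b)) := by
  simp [pvF, List.filter_flatMap, List.map_flatMap]

-- spans foldl of port A = pvSpans
theorem pvSpans_foldl (p : List Int) (a : Int) (acc : List (Int × Int)) :
    p.foldl (fun (st : Int × List (Int × Int)) pi => (st.1 + pi, st.2 ++ [(st.1, st.1 + pi)])) (a, acc)
      = (a + p.sum, acc ++ pvSpans a p) := by
  induction p generalizing a acc with
  | nil => simp [pvSpans]
  | cons pi rest ih => simp [pvSpans, ih, List.append_assoc]; ring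

theorem pvSpans_bounds (p : List Int) (a : Int) (h : ∀ x ∈ p, 0 ≤ x) :
    ∀ s ∈ pvSpans a p, a ≤ s.1 ∧ s.1 ≤ s.2 ∧ s.2 ≤ a + p.sum := by
  induction p generalizing a with
  | nil => simp [pvSpans]
  | cons pi rest ih =>
    intro s hs
    have hpi : 0 ≤ pi := h pi (by simp)
    have hsum : 0 ≤ rest.sum := List.sum_nonneg (fun x hx => h x (by simp [hx]))
    simp [pvSpans] at hs
    rcases hs with h1 | h2
    · subst h1; simp; omega
    · have := ih (a + pi) (fun x hx => h x (by simp [hx])) s h2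
      simp at this ⊢; omega

-- concatenating the consecutive ranges gives one range
theorem pvSpans_flat (p : List Int) (a : Int) (h : ∀ x ∈ p, 0 ≤ x) :
    (pvSpans a p).flatMap (fun s => PySem.List.pyRange s.1 s.2) = PySem.List.pyRange a (a + p.sum) := by
  induction p generalizing a with
  | nil => simp [pvSpans, PySem.List.pyRange_one_eq_nil]
  | cons pi rest ih =>
    have hpi : 0 ≤ pi := h pi (by simp)
    have hsum : 0 ≤ rest.sum := List.sum_nonneg (fun x hx => h x (by simp [hx]))
    simp only [pvSpans, List.flatMap_cons, ih (a + pi) (fun x hx => h x (by simp [hx]))]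
    rw [List.sum_cons, ← add_assoc]
    exact (PySem.List.pyRange_one_append a (a + pi) (a + pi + rest.sum) (by omega) (by omega)).symm

-- indicator sum over consecutive disjoint spans
theorem pvSpans_indicator_in (p : List Int) (a v : Int) (L : List Int) (h : ∀ x ∈ p, 0 ≤ x)
    (hv1 : a ≤ v) (hv2 : v < a + p.sum) :
    (pvSpans a p).flatMap (fun t => if t.1 ≤ v ∧ v < t.2 then L else []) = L := by
  induction p generalizing a with
  | nil => simp at hv2; omega
  | cons pi rest ih =>
    have hpi : 0 ≤ pi := h pi (by simp)
    simp only [pvSpans, List.flatMap_cons]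
    by_cases hc : v < a + pi
    · rw [if_pos ⟨hv1, hc⟩]
      have : (pvSpans (a + pi) rest).flatMap (fun t => if t.1 ≤ v ∧ v < t.2 then L else []) = [] := by
        apply List.flatMap_eq_nil_iff.mpr
        intro t ht
        have := pvSpans_bounds rest (a + pi) (fun x hx => h x (by simp [hx])) t ht
        rw [if_neg]; omega
      simp [this]
    · rw [if_neg (by omega)]
      have := ih (a + pi) (fun x hx => h x (by simp [hx])) (by omega) (by simp at hv2 ⊢; omega)
      simp [this]

theorem pvEvIJ_cons (i y : Int) (ys : List Int) :
    pvEvIJ i (y :: ys) = [(i, y), (y, i)] ++ pvEvIJ i ys := by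
  simp [pvEvIJ]

-- pvF on the inner ij-event block
theorem pvF_evIJ_self (v : Int) (ys : List Int) (h : v ∉ ys) : pvF v (pvEvIJ v ys) = ys := by
  induction ys with
  | nil => simp [pvEvIJ, pvF]
  | cons y ys ih =>
    have hy : y ≠ v := by intro he; exact h (by simp [he])
    rw [pvEvIJ_cons, pvF_append, ih (fun hm => h (by simp [hm]))]
    simp [pvF, hy]

theorem pvF_evIJ_none (v i : Int) (ys : List Int) (h : v ∉ ys) (hi : i ≠ v) :
    pvF v (pvEvIJ i ys) = [] := by
  induction ys with
  | nil => simp [pvEvIJ, pvF]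
  | cons y ys ih =>
    have hy : y ≠ v := by intro he; exact h (by simp [he])
    rw [pvEvIJ_cons, pvF_append, ih (fun hm => h (by simp [hm]))]
    simp [pvF, hy, hi]

theorem pvF_evIJ_mem (v i : Int) (ys : List Int) (h : v ∈ ys) (hnd : ys.Nodup) (hi : i ≠ v) :
    pvF v (pvEvIJ i ys) = [i] := by
  induction ys with
  | nil => simp at h
  | cons y ys ih =>
    rw [pvEvIJ_cons, pvF_append]
    simp only [List.nodup_cons] at hnd
    by_cases hy : y = v
    · rw [pvF_evIJ_none v i ys (hy ▸ hnd.1) hi]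
      simp [pvF, hy, hi]
    · have hm : v ∈ ys := by
        rcases List.mem_cons.mp h with h1 | h1
        · exact absurd h1.symm hy
        · exact h1
      rw [ih hm hnd.2]
      simp [pvF, hy, hi]

-- pvF on a cross-pair block, for separated spans (c0 entirely below c1)
theorem pvF_ev2_left (v : Int) (c0 c1 : Int × Int) (hsep : c0.2 ≤ c1.1)
    (hv : c0.1 ≤ v ∧ v < c0.2) :
    pvF v (pvEv2 c0 c1) = PySem.List.pyRange c1.1 c1.2 := by
  have hnot : v ∉ PySem.List.pyRange c1.1 c1.2 := by
    rw [PySem.List.mem_pyRange_one]; omega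
  unfold pvEv2
  rw [pvF_flatMap]
  have hmem : v ∈ PySem.List.pyRange c0.1 c0.2 := PySem.List.mem_pyRange_one.mpr hv
  have hnd := PySem.List.nodup_pyRange_one c0.1 c0.2
  -- flatMap where only the i = v element contributes
  revert hmem hnd
  generalize PySem.List.pyRange c0.1 c0.2 = xs
  intro hmem hnd
  induction xs with
  | nil => simp at hmem
  | cons x xs ih =>
    simp only [List.flatMap_cons]
    simp only [List.nodup_cons] at hnd
    by_cases hx : x = v
    · have : xs.flatMap (fun i => pvF v (pvEvIJ i (PySem.List.pyRange c1.1 c1.2))) = [] := by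
        apply List.flatMap_eq_nil_iff.mpr
        intro i hi
        exact pvF_evIJ_none v i _ hnot (by intro he; exact hnd.1 (by rw [hx, ← he]; exact hi))
      rw [hx, pvF_evIJ_self v _ hnot, this]
      simp
    · have hm : v ∈ xs := by
        rcases List.mem_cons.mp hmem with h1 | h1
        · exact absurd h1.symm hx
        · exact h1
      rw [pvF_evIJ_none v x _ hnot hx, ih hm hnd.2]
      simp

theorem pvF_ev2_right (v : Int) (c0 c1 : Int × Int) (hsep : c0.2 ≤ c1.1)
    (hv : c1.1 ≤ v ∧ v < c1.2) :
    pvF v (pvEv2 c0 c1) = PySem.List.pyRange c0.1 c0.2 := by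
  unfold pvEv2
  rw [pvF_flatMap]
  have hmem : v ∈ PySem.List.pyRange c1.1 c1.2 := PySem.List.mem_pyRange_one.mpr hv
  have hnd := PySem.List.nodup_pyRange_one c1.1 c1.2
  have : ∀ i ∈ PySem.List.pyRange c0.1 c0.2, pvF v (pvEvIJ i (PySem.List.pyRange c1.1 c1.2)) = [i] := by
    intro i hi
    have := PySem.List.mem_pyRange_one.mp hi
    exact pvF_evIJ_mem v i _ hmem hnd (by omega)
  calc (PySem.List.pyRange c0.1 c0.2).flatMap (fun i => pvF v (pvEvIJ i (PySem.List.pyRange c1.1 c1.2)))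
      = (PySem.List.pyRange c0.1 c0.2).flatMap (fun i => [i]) := List.flatMap_congr this
    _ = PySem.List.pyRange c0.1 c0.2 := by simp

theorem pvF_ev2_no (v : Int) (c0 c1 : Int × Int)
    (h0 : ¬ (c0.1 ≤ v ∧ v < c0.2)) (h1 : ¬ (c1.1 ≤ v ∧ v < c1.2)) :
    pvF v (pvEv2 c0 c1) = [] := by
  have hnot1 : v ∉ PySem.List.pyRange c1.1 c1.2 := by rw [PySem.List.mem_pyRange_one]; omega
  unfold pvEv2
  rw [pvF_flatMap]
  apply List.flatMap_eq_nil_iff.mpr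
  intro i hi
  have := PySem.List.mem_pyRange_one.mp hi
  exact pvF_evIJ_none v i _ hnot1 (by omega)

-- events of a cons of spans
theorem pvEvents_cons (s : Int × Int) (ss : List (Int × Int)) :
    pvEvents (s :: ss) = ss.flatMap (fun t => pvEv2 s t) ++ pvEvents ss := by
  simp [pvEvents, pyCombinations2, List.flatMap_append, List.flatMap_map]

-- v's lower bound is ≥ the offset
theorem pvLo_ge (p : List Int) (a v : Int) (h : ∀ x ∈ p, 0 ≤ x) : a ≤ pvLo a v p := by
  induction p generalizing a with
  | nil => simp [pvLo]
  | cons pi rest ih =>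
    have hpi : 0 ≤ pi := h pi (by simp)
    have := ih (a + pi) (fun x hx => h x (by simp [hx]))
    simp only [pvLo]
    split <;> omega

-- MAIN A-side: total appends received by an out-of-range / in-range vertex
theorem pvF_events_out (p : List Int) (a v : Int) (h : ∀ x ∈ p, 0 ≤ x)
    (hv : v < a ∨ a + p.sum ≤ v) :
    pvF v (pvEvents (pvSpans a p)) = [] := by
  induction p generalizing a with
  | nil => simp [pvSpans, pvEvents, pyCombinations2, pvF]
  | cons pi rest ih =>
    have hpi : 0 ≤ pi := h pi (by simp)
    have hrest : ∀ x ∈ rest, 0 ≤ x := fun x hx => h x (by simp [hx])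
    have hsum : 0 ≤ rest.sum := List.sum_nonneg hrest
    simp only [pvSpans, pvEvents_cons]
    rw [pvF_append, pvF_flatMap]
    have h1 : (pvSpans (a + pi) rest).flatMap
        (fun t => pvF v (pvEv2 (a, a + pi) t)) = [] := by
      apply List.flatMap_eq_nil_iff.mpr
      intro t ht
      have hb := pvSpans_bounds rest (a + pi) hrest t ht
      apply pvF_ev2_no v (a, a + pi) t
      · simp only [List.sum_cons] at hv; simp; omega
      · simp only [List.sum_cons] at hv; omega
    rw [h1, ih (a + pi) hrest (by simp only [List.sum_cons] at hv; omega)]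
    simp

theorem pvF_events_in (p : List Int) (a v : Int) (h : ∀ x ∈ p, 0 ≤ x)
    (hv1 : a ≤ v) (hv2 : v < a + p.sum) :
    pvF v (pvEvents (pvSpans a p)) =
      PySem.List.pyRange a (pvLo a v p) ++ PySem.List.pyRange (pvHi a v p) (a + p.sum) := by
  induction p generalizing a with
  | nil => simp at hv2; omega
  | cons pi rest ih =>
    have hpi : 0 ≤ pi := h pi (by simp)
    have hrest : ∀ x ∈ rest, 0 ≤ x := fun x hx => h x (by simp [hx])
    have hsum : 0 ≤ rest.sum := List.sum_nonneg hrest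
    simp only [pvSpans, pvEvents_cons, List.sum_cons] at *
    rw [pvF_append, pvF_flatMap]
    by_cases hc : v < a + pi
    · -- v lies in the first part
      have h1 : (pvSpans (a + pi) rest).flatMap (fun t => pvF v (pvEv2 (a, a + pi) t))
          = (pvSpans (a + pi) rest).flatMap (fun t => PySem.List.pyRange t.1 t.2) := by
        apply List.flatMap_congr
        intro t ht
        have hb := pvSpans_bounds rest (a + pi) hrest t ht
        exact pvF_ev2_left v (a, a + pi) t (by simp; omega) (by simp; omega)
      rw [h1, pvSpans_flat rest (a + pi) hrest,
          pvF_events_out rest (a + pi) v hrest (by omega)]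
      simp only [pvLo, pvHi, if_pos hc]
      rw [PySem.List.pyRange_one_eq_nil (le_refl a)]
      simp [add_assoc]
    · -- v lies in a later part
      have h1 : (pvSpans (a + pi) rest).flatMap (fun t => pvF v (pvEv2 (a, a + pi) t))
          = (pvSpans (a + pi) rest).flatMap
              (fun t => if t.1 ≤ v ∧ v < t.2 then PySem.List.pyRange a (a + pi) else []) := by
        apply List.flatMap_congr
        intro t ht
        have hb := pvSpans_bounds rest (a + pi) hrest t ht
        by_cases hvt : t.1 ≤ v ∧ v < t.2
        · rw [if_pos hvt]
          exact pvF_ev2_right v (a, a + pi) t (by simp; omega) hvt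
        · rw [if_neg hvt]
          exact pvF_ev2_no v (a, a + pi) t (by simp; omega) hvt
      rw [h1, pvSpans_indicator_in rest (a + pi) v _ hrest (by omega) (by omega),
          ih (a + pi) hrest (by omega) (by omega)]
      simp only [pvLo, pvHi, if_neg hc]
      have hlo := pvLo_ge rest (a + pi) v hrest
      rw [← List.append_assoc,
          ← PySem.List.pyRange_one_append a (a + pi) (pvLo (a + pi) v rest) (by omega) hlo]
      have : a + (pi + rest.sum) = a + pi + rest.sum := by ring
      rw [this]

-- items of the initial dict
theorem pvItems_d0 (n : Int) :
    (PySem.Dict.ofList ((PySem.List.pyRange 0 n).map (fun v => (v, ([] : List Int))))).items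
      = (PySem.List.pyRange 0 n).map (fun v => (v, ([] : List Int))) := by
  unfold PySem.Dict.ofList PySem.Dict.update
  have hnd : (((PySem.List.pyRange 0 n).map (fun v => (v, ([] : List Int)))).map
      (fun (p : Int × List Int) => p.1)).Nodup := by
    simp only [List.map_map]
    have : ((fun (p : Int × List Int) => p.1) ∘ fun v => (v, ([] : List Int))) = id := rfl
    rw [this, List.map_id]
    exact PySem.List.nodup_pyRange_one 0 n
  have := PySem.Dict.items_foldl_insert_fresh
      ((PySem.List.pyRange 0 n).map (fun v => (v, ([] : List Int))))
      (fun p => p.1) (fun p => p.2) PySem.Dict.empty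
      (fun a _ => by simp [PySem.Dict.contains_empty]) hnd
  simpa using this

theorem pvKeys_d0 (n : Int) :
    (PySem.Dict.ofList ((PySem.List.pyRange 0 n).map (fun v => (v, ([] : List Int))))).keys
      = PySem.List.pyRange 0 n := by
  simp only [PySem.Dict.keys, pvItems_d0, List.map_map]
  have : ((fun (p : Int × List Int) => p.1) ∘ fun v => (v, ([] : List Int))) = id := rfl
  rw [this, List.map_id]

-- keys occurring in events are vertices of the spans
theorem pvEvents_fst_bound (p : List Int) (a : Int) (h : ∀ x ∈ p, 0 ≤ x) :
    ∀ e ∈ pvEvents (pvSpans a p), a ≤ e.1 ∧ e.1 < a + p.sum := by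
  induction p generalizing a with
  | nil => simp [pvSpans, pvEvents, pyCombinations2]
  | cons pi rest ih =>
    have hpi : 0 ≤ pi := h pi (by simp)
    have hrest : ∀ x ∈ rest, 0 ≤ x := fun x hx => h x (by simp [hx])
    have hsum : 0 ≤ rest.sum := List.sum_nonneg hrest
    intro e he
    simp only [pvSpans, pvEvents_cons, List.mem_append] at he
    rcases he with he | he
    · rw [List.mem_flatMap] at he
      obtain ⟨t, ht, he⟩ := he
      have hb := pvSpans_bounds rest (a + pi) hrest t ht
      simp only [pvEv2, pvEvIJ, List.mem_flatMap] at he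
      obtain ⟨i, hi, j, hj, he⟩ := he
      rw [PySem.List.mem_pyRange_one] at hi hj
      simp only [List.mem_cons] at he
      simp only [List.sum_cons]
      rcases he with he | he | he
      · subst he; simp at hi ⊢; omega
      · subst he; simp at hj ⊢; omega
      · simp at he
    · have := ih (a + pi) hrest e he
      simp only [List.sum_cons]
      omega

-- the nested loops of port A are one fold over the flat event list
theorem pvA_fold (spans : List (Int × Int)) (d : PySem.Dict Int (List Int)) :
    (pyCombinations2 spans).foldl (fun g c =>
        (PySem.List.pyRange c.1.1 c.1.2).foldl (fun g i =>
          (PySem.List.pyRange c.2.1 c.2.2).foldl (fun g j =>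
            (g.modify i [] (fun l => l ++ [j])).modify j [] (fun l => l ++ [i])) g) g) d
      = (pvEvents spans).foldl (fun g e => g.modify e.1 [] (fun l => l ++ [e.2])) d := by
  simp [pvEvents, pvEv2, pvEvIJ, List.foldl_flatMap]

-- the event fold over the fresh dict, characterized pointwise
theorem pvDictChar (E : List (Int × Int)) (n : Int)
    (hb : ∀ e ∈ E, 0 ≤ e.1 ∧ e.1 < n) :
    (E.foldl (fun g e => g.modify e.1 [] (fun l => l ++ [e.2]))
        (PySem.Dict.ofList ((PySem.List.pyRange 0 n).map (fun v => (v, ([] : List Int)))))).items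
      = (PySem.List.pyRange 0 n).map (fun v => (v, pvF v E)) := by
  set d0 : PySem.Dict Int (List Int) :=
    PySem.Dict.ofList ((PySem.List.pyRange 0 n).map (fun v => (v, ([] : List Int)))) with hd0
  set D := E.foldl (fun g e => g.modify e.1 [] (fun l => l ++ [e.2])) d0 with hD
  have hd0k : d0.keys = PySem.List.pyRange 0 n := pvKeys_d0 n
  have hd0nd : d0.keys.Nodup := by rw [hd0k]; exact PySem.List.nodup_pyRange_one 0 n
  have hnd : D.keys.Nodup :=
    PySem.Dict.nodup_keys_foldl_modify_key E (fun e => e.1) ([] : List Int)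
      (fun _ e l => l ++ [e.2]) d0 hd0nd
  have hupd : PySem.Set.update (PySem.List.pyRange 0 n) (E.map (fun e => e.1))
      = PySem.List.pyRange 0 n := by
    rw [PySem.Set.update_eq_append_filter]
    have hfil : (PySem.Set.ofList (E.map (fun e => e.1))).filter
        (fun y => !(PySem.Set.contains (PySem.List.pyRange 0 n) y)) = [] := by
      apply List.filter_eq_nil_iff.mpr
      intro y hy
      have hy' : y ∈ E.map (fun e => e.1) := (PySem.Set.mem_ofList _ _).mp hy
      obtain ⟨e, he, rfl⟩ := List.mem_map.mp hy'
      have := hb e he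
      simp [PySem.List.mem_pyRange_one]
      omega
    rw [hfil, List.append_nil]
  have hkeys : D.keys = PySem.List.pyRange 0 n := by
    have hk := PySem.Dict.keys_foldl_modify_key E (fun e => e.1) ([] : List Int)
      (fun _ e l => l ++ [e.2]) d0
    rw [hd0k] at hk
    exact hk.trans hupd
  rw [PySem.Dict.items_eq_map_keys D hnd [], hkeys]
  apply List.map_congr_left
  intro v hv
  have hvr := PySem.List.mem_pyRange_one.mp hv
  have hg : D.getD v [] = d0.getD v [] ++ pvF v E :=
    PySem.Dict.getD_foldl_modify_append E d0 v
  have hd0g : d0.getD v [] = [] := by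
    apply PySem.Dict.getD_of_mem_items d0 _ hd0nd
    rw [hd0]
    rw [pvItems_d0]
    exact List.mem_map_of_mem hv
  rw [hg, hd0g, List.nil_append]

-- A-side characterization
theorem pvA_items (p : List Int) (h : ∀ x ∈ p, 0 ≤ x) :
    generate_complete_multipartite_graph p
      = (PySem.List.pyRange 0 p.sum).map (fun v =>
          (v, PySem.List.pyRange 0 (pvLo 0 v p) ++ PySem.List.pyRange (pvHi 0 v p) p.sum)) := by
  simp only [generate_complete_multipartite_graph]
  rw [pvSpans_foldl p 0 []]
  simp only [List.nil_append]
  rw [pvA_fold]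
  have hb : ∀ e ∈ pvEvents (pvSpans 0 p), 0 ≤ e.1 ∧ e.1 < p.sum := by
    intro e he
    have := pvEvents_fst_bound p 0 h e he
    omega
  rw [pvDictChar _ _ hb]
  apply List.map_congr_left
  intro v hv
  have hvr := PySem.List.mem_pyRange_one.mp hv
  have := pvF_events_in p 0 v h (by omega) (by omega)
  rw [this]
  simp

-- inserting a constant value at in-range keys of a fully-mapped dict
theorem pvIns (ks : List Int) (g : PySem.Dict Int (List Int)) (f : Int → List Int)
    (n : Int) (val : List Int)
    (hg : g.items = (PySem.List.pyRange 0 n).map (fun v => (v, f v)))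
    (hk : ∀ k ∈ ks, 0 ≤ k ∧ k < n) :
    (ks.foldl (fun g v => g.insert v val) g).items
      = (PySem.List.pyRange 0 n).map (fun v => (v, if v ∈ ks then val else f v)) := by
  induction ks generalizing g f with
  | nil => simpa using hg
  | cons k ks ih =>
    have hkin := hk k (by simp)
    have hcont : g.contains k = true := by
      rw [PySem.Dict.contains_iff_mem_keys]
      simp only [PySem.Dict.keys, hg, List.map_map]
      have : ((fun (p : Int × List Int) => p.1) ∘ fun v => (v, f v)) = id := rfl
      rw [this, List.map_id]
      exact PySem.List.mem_pyRange_one.mpr (by omega)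
    have hstep : (g.insert k val).items
        = (PySem.List.pyRange 0 n).map (fun v => (v, if v = k then val else f v)) := by
      rw [PySem.Dict.items_insert_of_contains g val hcont, hg, List.map_map]
      apply List.map_congr_left
      intro v _
      by_cases hvk : v = k
      · simp [hvk]
      · simp [hvk, Function.comp]
    rw [List.foldl_cons]
    rw [ih (g.insert k val) (fun v => if v = k then val else f v) hstep
        (fun x hx => hk x (by simp [hx]))]
    apply List.map_congr_left
    intro v _
    by_cases h1 : v ∈ ks <;> by_cases h2 : v = k <;> simp [h1, h2]

-- the B loop, characterized
theorem pvBLoop (parts : List Int) (lo : Int) (g : PySem.Dict Int (List Int))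
    (f : Int → List Int) (n : Int)
    (h : ∀ x ∈ parts, 0 ≤ x) (hlo : 0 ≤ lo) (hn : lo + parts.sum ≤ n)
    (hg : g.items = (PySem.List.pyRange 0 n).map (fun v => (v, f v))) :
    (parts.foldl (fun (st : Int × PySem.Dict Int (List Int)) pi =>
        (st.1 + pi,
         (PySem.List.pyRange st.1 (st.1 + pi)).foldl
           (fun g v => g.insert v (PySem.List.pyRange 0 st.1 ++ PySem.List.pyRange (st.1 + pi) n)) st.2))
        (lo, g)).2.items
      = (PySem.List.pyRange 0 n).map (fun v =>
          (v, if lo ≤ v ∧ v < lo + parts.sum then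
                PySem.List.pyRange 0 (pvLo lo v parts) ++ PySem.List.pyRange (pvHi lo v parts) n
              else f v)) := by
  induction parts generalizing lo g f with
  | nil =>
    simp only [List.foldl_nil, hg, List.sum_nil]
    apply List.map_congr_left
    intro v _
    rw [if_neg (by omega)]
  | cons pi rest ih =>
    have hpi : 0 ≤ pi := h pi (by simp)
    have hrest : ∀ x ∈ rest, 0 ≤ x := fun x hx => h x (by simp [hx])
    have hsum : 0 ≤ rest.sum := List.sum_nonneg hrest
    simp only [List.sum_cons] at hn ⊢
    rw [List.foldl_cons]
    have hstep := pvIns (PySem.List.pyRange lo (lo + pi)) g f n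
      (PySem.List.pyRange 0 lo ++ PySem.List.pyRange (lo + pi) n) hg
      (by intro k hk; have := PySem.List.mem_pyRange_one.mp hk; omega)
    rw [ih (lo + pi) _ _ hrest (by omega) (by omega) hstep]
    apply List.map_congr_left
    intro v hv
    have hvr := PySem.List.mem_pyRange_one.mp hv
    simp only [pvLo, pvHi, PySem.List.mem_pyRange_one]
    split_ifs <;> first | rfl | omega

-- B-side characterization
theorem pvB_items (p : List Int) (h : ∀ x ∈ p, 0 ≤ x) :
    generate_complete_multipartite_graph_alt p
      = (PySem.List.pyRange 0 p.sum).map (fun v =>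
          (v, PySem.List.pyRange 0 (pvLo 0 v p) ++ PySem.List.pyRange (pvHi 0 v p) p.sum)) := by
  simp only [generate_complete_multipartite_graph_alt]
  rw [pvBLoop p 0 _ (fun _ => []) p.sum h (le_refl 0) (by simp) (pvItems_d0 p.sum)]
  apply List.map_congr_left
  intro v hv
  have hvr := PySem.List.mem_pyRange_one.mp hv
  rw [if_pos (by omega)]

-- ===== VERDICT (by name: the statement is the Claim_ definition above) =====
theorem generate_complete_multipartite_graph_spec : Claim_equal_generate_complete_multipartite_graph := by
  intro p _ hpre
  unfold Spec_generate_complete_multipartite_graph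
  rw [pvA_items p hpre, pvB_items p hpre]
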